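-- pv_equiv track=rewrite | github.com/xomicsdatascience/pscs | singularity/run_pscs_pipeline.py | generate_unique_node_id
-- ===== SOURCE A (Python) =====
-- def generate_unique_node_id(nodes: dict) -> str:
--     node_ids = set(nodes.keys())
--     idx = 0
--     s = f"temp_loader_{idx}"
--     while s in node_ids:
--         idx += 1
--         s = f"temp_loader_{idx}"
--     return s
-- ===== SOURCE B (Python) =====
-- def _temp_index(key):
--     # index N such that key is exactly the canonical string f"temp_loader_{N}", else None
--     prefix = "temp_loader_"
--     if not key.startswith(prefix):
--         return None
--     rest = key[len(prefix):]
--     if not rest.isdigit():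
--         return None
--     if len(rest) > 1 and rest[0] == '0':
--         return None
--     n = 0
--     for ch in rest:
--         n = 10 * n + (ord(ch) - ord('0'))
--     return n
--
--
-- def generate_unique_node_id(nodes: dict) -> str:
--     used = set()
--     for key in nodes.keys():
--         i = _temp_index(key)
--         if i is not None:
--             used.add(i)
--     m = 0
--     while m in used:
--         m += 1
--     return f"temp_loader_{m}"
-- ===== Notes on version B (the rewrite author's own statement) =====
-- stated objective: alternative
-- what changed: A repeatedly formats a candidate string and probes the key set for each index; B makes one pass over the keys, canonically parsing each 'temp_loader_<N>' key into a set of used integer indices, then returns the smallest non-negative integer missing from that set.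
import Mathlib
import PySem

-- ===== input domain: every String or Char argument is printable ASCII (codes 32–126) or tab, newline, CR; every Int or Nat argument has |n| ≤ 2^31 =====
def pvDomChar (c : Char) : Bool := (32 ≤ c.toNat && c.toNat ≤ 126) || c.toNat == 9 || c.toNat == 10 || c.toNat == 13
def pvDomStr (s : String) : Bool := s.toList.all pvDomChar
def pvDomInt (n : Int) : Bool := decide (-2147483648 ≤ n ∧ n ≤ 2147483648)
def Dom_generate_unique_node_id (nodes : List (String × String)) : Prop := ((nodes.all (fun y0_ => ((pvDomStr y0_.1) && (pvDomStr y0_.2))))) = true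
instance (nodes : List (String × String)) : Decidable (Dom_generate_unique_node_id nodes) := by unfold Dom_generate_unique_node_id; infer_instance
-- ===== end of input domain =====

-- B replaces A's repeated format-and-test probing with one pass that collects the set of
-- canonically-used indices and then scans for the smallest free one (objective: alternative).


-- ===== PORT A =====
-- A's while loop as fuel recursion; fuel nodes.length + 1 always suffices for the loop to
-- exit on its own (the candidate strings for idx = 0 .. |nodes| are distinct, so at least
-- one of them is not among the ≤ |nodes| keys), so the fuel-exhausted base case is never
-- the returned value on any input
def pvLoopA (node_ids : PySem.Set String) (idx : Nat) (fuel : Nat) : String :=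
  match fuel with
  | 0 => "temp_loader_" ++ PySem.Int.toStr (idx : Int)
  | fuel + 1 =>
    let s := "temp_loader_" ++ PySem.Int.toStr (idx : Int)
    if PySem.Set.contains node_ids s then pvLoopA node_ids (idx + 1) fuel else s

def generate_unique_node_id (nodes : List (String × String)) : String :=
  let node_ids : PySem.Set String := PySem.Set.ofList (nodes.map Prod.fst)
  pvLoopA node_ids 0 (nodes.length + 1)

-- ===== PORT B =====
-- _temp_index: canonical parse of "temp_loader_<N>"; key[len(prefix):] is List.drop 12,
-- rest.isdigit() is PySem.Chars.strIsdigit, ord ch - ord '0' is c.toNat - 48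
-- (exact on the ASCII domain)
def pvTempIndex? (key : String) : Option Nat :=
  let cs := key.toList
  if PySem.Chars.startswith cs ("temp_loader_".toList) then
    let rest := cs.drop 12
    if PySem.Chars.strIsdigit rest then
      if 1 < rest.length ∧ rest[0]? = some '0' then none
      else some (rest.foldl (fun n c => 10 * n + (c.toNat - 48)) 0)
    else none
  else none

-- B's 'while m in used' loop as fuel recursion; the same fuel bound suffices
-- (used has at most |nodes| elements)
def pvLoopB (used : PySem.Set Nat) (m : Nat) (fuel : Nat) : String :=
  match fuel with
  | 0 => "temp_loader_" ++ PySem.Int.toStr (m : Int)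
  | fuel + 1 =>
    if PySem.Set.contains used m then pvLoopB used (m + 1) fuel
    else "temp_loader_" ++ PySem.Int.toStr (m : Int)

def generate_unique_node_id_alt (nodes : List (String × String)) : String :=
  let used : PySem.Set Nat :=
    nodes.foldl (fun acc kv =>
      match pvTempIndex? kv.1 with
      | some i => PySem.Set.add acc i
      | none => acc) []
  pvLoopB used 0 (nodes.length + 1)

-- ===== PRECONDITION & SPEC =====
def Spec_generate_unique_node_id (nodes : List (String × String)) (out : String) : Prop := out = generate_unique_node_id_alt nodes
instance (nodes : List (String × String)) (out : String) : Decidable (Spec_generate_unique_node_id nodes out) := by unfold Spec_generate_unique_node_id; infer_instance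

-- ===== CLAIM (what is proved, stated in full; the proofs are below) =====
def Claim_equal_generate_unique_node_id : Prop := ∀ (nodes : List (String × String)), Dom_generate_unique_node_id nodes → Spec_generate_unique_node_id nodes (generate_unique_node_id nodes)

-- ===== LEMMAS AND PROOFS =====

def pvFStr (m : Nat) : String := "temp_loader_" ++ PySem.Int.toStr (m : Int)

theorem pv_toStr_natCast (m : Nat) : PySem.Int.toStr (m : Int) = String.ofList (Nat.toDigits 10 m) := by
  have h : ¬ ((m : Int) < 0) := by omega
  simp [PySem.Int.toStr, PySem.Int.toChars, h]

theorem pv_digitChar_isdigit {d : Nat} (h : d < 10) : PySem.Chars.isdigit (Nat.digitChar d) = true := by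
  interval_cases d <;> decide

theorem pv_digitChar_toNat {d : Nat} (h : d < 10) : (Nat.digitChar d).toNat = d + 48 := by
  interval_cases d <;> decide

theorem pv_digitChar_ne_zero {d : Nat} (h : d < 10) (hd : d ≠ 0) : Nat.digitChar d ≠ '0' := by
  interval_cases d <;> simp_all <;> decide

theorem pv_isdigit_bounds {c : Char} (h : PySem.Chars.isdigit c = true) : 48 ≤ c.toNat ∧ c.toNat ≤ 57 := by
  simp [PySem.Chars.isdigit, Char.le_def] at h
  exact h

theorem pv_char_eq_of_toNat {c d : Char} (h : c.toNat = d.toNat) : c = d :=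
  Char.ext (UInt32.toNat_inj.mp h)

theorem pv_digitChar_inv {c : Char} (h : PySem.Chars.isdigit c = true) : Nat.digitChar (c.toNat - 48) = c := by
  obtain ⟨h1, h2⟩ := pv_isdigit_bounds h
  have hd : c.toNat - 48 < 10 := by omega
  apply pv_char_eq_of_toNat
  rw [pv_digitChar_toNat hd]; omega

theorem pv_foldl_val (l : List Nat) (h : ∀ d ∈ l, d < 10) :
    ((l.map Nat.digitChar).reverse).foldl (fun n c => 10 * n + (c.toNat - 48)) 0 = Nat.ofDigits 10 l := by
  induction l with
  | nil => simp
  | cons d t ih =>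
    simp only [List.map_cons, List.reverse_cons, List.foldl_append, List.foldl_cons, List.foldl_nil]
    rw [ih (fun x hx => h x (List.mem_cons_of_mem _ hx))]
    have hd : d < 10 := h d (List.mem_cons_self ..)
    rw [pv_digitChar_toNat hd, Nat.ofDigits_cons]
    omega

theorem pv_toDigitsCore_eq (fuel : Nat) : ∀ (n : Nat) (ds : List Char), 0 < n → n ≤ fuel →
    Nat.toDigitsCore 10 fuel n ds = ((Nat.digits 10 n).map Nat.digitChar).reverse ++ ds := by
  induction fuel with
  | zero => intro n ds h1 h2; omega
  | succ fuel ih =>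
    intro n ds h1 h2
    rw [Nat.toDigitsCore]
    by_cases hq : n / 10 = 0
    · have hlt : n < 10 := by omega
      rw [if_pos hq]
      rw [Nat.digits_def' (by norm_num) h1, hq]
      simp [Nat.mod_eq_of_lt hlt]
    · rw [if_neg hq]
      have hql : n / 10 ≤ fuel := by
        have := Nat.div_lt_self h1 (by norm_num : 1 < 10); omega
      rw [ih (n / 10) _ (Nat.pos_of_ne_zero hq) hql]
      rw [Nat.digits_def' (by norm_num) h1]
      simp

theorem pv_toDigits10 (m : Nat) :
    Nat.toDigits 10 m = if m = 0 then ['0'] else ((Nat.digits 10 m).map Nat.digitChar).reverse := by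
  by_cases hm : m = 0
  · subst hm; decide
  · rw [if_neg hm]
    have := pv_toDigitsCore_eq (m + 1) m [] (Nat.pos_of_ne_zero hm) (by omega)
    simpa [Nat.toDigits] using this

theorem pv_fstr_toList (m : Nat) : (pvFStr m).toList = "temp_loader_".toList ++ Nat.toDigits 10 m := by
  simp [pvFStr, pv_toStr_natCast]

theorem pv_parse_canon (m : Nat) : pvTempIndex? (pvFStr m) = some m := by
  by_cases hm : m = 0
  · subst hm; decide
  · have hcs := pv_fstr_toList m
    have hrest : (pvFStr m).toList.drop 12 = Nat.toDigits 10 m := by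
      rw [hcs]
      have : ("temp_loader_".toList).length = 12 := by decide
      rw [← this, List.drop_left]
    obtain ⟨l', d, hld⟩ := (Nat.digits 10 m).eq_nil_or_concat.resolve_left
      (Nat.digits_ne_nil_iff_ne_zero.mpr hm)
    have hdig : Nat.toDigits 10 m = Nat.digitChar d :: (l'.map Nat.digitChar).reverse := by
      rw [pv_toDigits10, if_neg hm, hld]
      simp [List.concat_eq_append]
    have hdlt : ∀ x ∈ Nat.digits 10 m, x < 10 := fun x hx => Nat.digits_lt_base (by norm_num) hx
    have hd10 : d < 10 := hdlt d (by rw [hld]; simp [List.concat_eq_append])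
    have hdne : d ≠ 0 := by
      have h2 := Nat.getLast_digit_ne_zero 10 hm
      simp only [hld, List.concat_eq_append, List.getLast_concat] at h2
      exact h2
    rw [pvTempIndex?]
    simp only [hrest]
    rw [if_pos (by rw [hcs]; exact (PySem.Chars.startswith_iff _ _).mpr ⟨_, rfl⟩)]
    rw [if_pos ?hdig]
    case hdig =>
      rw [hdig]
      simp only [PySem.Chars.strIsdigit, List.isEmpty_cons, Bool.not_false, Bool.true_and]
      rw [List.all_eq_true]
      intro c hc
      have hmem : c ∈ ((Nat.digits 10 m).map Nat.digitChar).reverse := by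
        rw [pv_toDigits10, if_neg hm] at hdig
        rw [hdig]; exact hc
      rw [List.mem_reverse, List.mem_map] at hmem
      obtain ⟨x, hx, rfl⟩ := hmem
      exact pv_digitChar_isdigit (hdlt x hx)
    rw [if_neg ?hzero]
    case hzero =>
      rintro ⟨-, h0⟩
      rw [hdig] at h0
      simp at h0
      exact pv_digitChar_ne_zero hd10 hdne h0
    congr 1
    rw [pv_toDigits10, if_neg hm]
    rw [pv_foldl_val _ hdlt, Nat.ofDigits_digits]

theorem pv_parse_sound {k : String} {m : Nat} (h : pvTempIndex? k = some m) : k = pvFStr m := by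
  simp only [pvTempIndex?] at h
  split_ifs at h with h1 h2 h3
  injection h with hval
  obtain ⟨t, ht⟩ := (PySem.Chars.startswith_iff _ _).mp h1
  have hrest : k.toList.drop 12 = t := by
    rw [← ht]
    have h12 : ("temp_loader_".toList).length = 12 := by decide
    rw [← h12, List.drop_left]
  rw [hrest] at h2 h3 hval
  have htne : t ≠ [] := by
    intro hnil; rw [hnil] at h2; exact absurd h2 (by decide)
  have hall : ∀ c ∈ t, PySem.Chars.isdigit c = true := by
    simp only [PySem.Chars.strIsdigit, Bool.and_eq_true, List.all_eq_true] at h2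
    exact h2.2
  set ds : List Nat := (t.map (fun c => c.toNat - 48)).reverse with hds
  have htds : (ds.map Nat.digitChar).reverse = t := by
    rw [hds, List.map_reverse, List.reverse_reverse, List.map_map]
    conv_rhs => rw [← List.map_id t]
    exact List.map_congr_left (fun c hc => pv_digitChar_inv (hall c hc))
  have hdslt : ∀ d ∈ ds, d < 10 := by
    intro d hd
    rw [hds, List.mem_reverse, List.mem_map] at hd
    obtain ⟨c, hc, rfl⟩ := hd
    have := pv_isdigit_bounds (hall c hc)
    omega
  have hval' : Nat.ofDigits 10 ds = m := by
    rw [← hval, ← pv_foldl_val ds hdslt, htds]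
  by_cases h0 : t = ['0']
  · have : m = 0 := by rw [← hval]; rw [h0]; decide
    subst this
    have hteq : k.toList = (pvFStr 0).toList := by
      rw [pv_fstr_toList, ← ht, h0]; decide
    have h4 := congrArg String.ofList hteq
    rwa [String.ofList_toList, String.ofList_toList] at h4
  · obtain ⟨c0, t', rfl⟩ : ∃ c0 t', t = c0 :: t' := by
      cases t with
      | nil => exact absurd rfl htne
      | cons a b => exact ⟨a, b, rfl⟩
    have hc0 : c0 ≠ '0' := by
      intro hc0eq
      rcases Nat.lt_or_ge 1 (c0 :: t').length with hl | hl
      · exact h3 ⟨hl, by rw [hc0eq]; rfl⟩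
      · have : t' = [] := by
          cases t' with
          | nil => rfl
          | cons x y => simp at hl
        exact h0 (by rw [this, hc0eq])
    have hlast : ∀ (hne : ds ≠ []), ds.getLast hne ≠ 0 := by
      intro hne
      have hdseq : ds = (t'.map (fun c => c.toNat - 48)).reverse ++ [c0.toNat - 48] := by
        rw [hds]; simp
      have hgl : ds.getLast hne = c0.toNat - 48 := by
        simp only [hdseq]
        exact List.getLast_concat
      rw [hgl]
      intro hz
      have hb := pv_isdigit_bounds (hall c0 (List.mem_cons_self ..))
      have : c0.toNat = 48 := by omega
      exact hc0 (pv_char_eq_of_toNat (by rw [this]; decide))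
    have hdd : Nat.digits 10 m = ds := by
      rw [← hval']
      exact Nat.digits_ofDigits 10 (by norm_num) ds hdslt hlast
    have hm0 : m ≠ 0 := by
      intro hz
      rw [hz] at hdd
      have hnil : ds = [] := hdd.symm.trans rfl ▸ hdd.symm
      rw [hds] at hnil
      simp at hnil
    have htd : Nat.toDigits 10 m = c0 :: t' := by
      rw [pv_toDigits10, if_neg hm0, hdd, htds]
    have hteq : k.toList = (pvFStr m).toList := by
      rw [pv_fstr_toList, ← ht, htd]
    have h4 := congrArg String.ofList hteq
    rwa [String.ofList_toList, String.ofList_toList] at h4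

theorem pv_mem_used (nodes : List (String × String)) : ∀ (acc : PySem.Set Nat) (m : Nat),
    m ∈ nodes.foldl (fun acc kv => match pvTempIndex? kv.1 with
      | some i => PySem.Set.add acc i
      | none => acc) acc ↔ m ∈ acc ∨ ∃ kv ∈ nodes, pvTempIndex? kv.1 = some m := by
  induction nodes with
  | nil => intro acc m; simp
  | cons kv t ih =>
    intro acc m
    rw [List.foldl_cons]
    cases hp : pvTempIndex? kv.1 with
    | none =>
      rw [ih]
      simp only [List.mem_cons]
      constructor
      · rintro (h | ⟨kv', h1, h2⟩)
        · exact Or.inl h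
        · exact Or.inr ⟨kv', Or.inr h1, h2⟩
      · rintro (h | ⟨kv', (rfl | h1), h2⟩)
        · exact Or.inl h
        · rw [hp] at h2; exact absurd h2 (by simp)
        · exact Or.inr ⟨kv', h1, h2⟩
    | some i =>
      rw [ih]
      simp only [PySem.Set.mem_add, List.mem_cons]
      constructor
      · rintro ((h | rfl) | ⟨kv', h1, h2⟩)
        · exact Or.inl h
        · exact Or.inr ⟨kv, Or.inl rfl, hp⟩
        · exact Or.inr ⟨kv', Or.inr h1, h2⟩
      · rintro (h | ⟨kv', (rfl | h1), h2⟩)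
        · exact Or.inl (Or.inl h)
        · rw [hp] at h2; injection h2 with h2; exact Or.inl (Or.inr h2.symm)
        · exact Or.inr ⟨kv', h1, h2⟩

theorem pv_cond_eq (nodes : List (String × String)) (m : Nat) :
    PySem.Set.contains (nodes.foldl (fun acc kv => match pvTempIndex? kv.1 with
      | some i => PySem.Set.add acc i
      | none => acc) []) m
      = PySem.Set.contains (PySem.Set.ofList (nodes.map Prod.fst))
          ("temp_loader_" ++ PySem.Int.toStr (m : Int)) := by
  have hiff : (m ∈ nodes.foldl (fun acc kv => match pvTempIndex? kv.1 with
      | some i => PySem.Set.add acc i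
      | none => acc) []) ↔ pvFStr m ∈ nodes.map Prod.fst := by
    rw [pv_mem_used]
    simp only [List.mem_nil_iff, false_or, List.mem_map]
    constructor
    · rintro ⟨kv, hkv, hp⟩
      exact ⟨kv, hkv, pv_parse_sound hp⟩
    · rintro ⟨kv, hkv, heq⟩
      exact ⟨kv, hkv, by rw [heq]; exact pv_parse_canon m⟩
  have h2 : (pvFStr m ∈ nodes.map Prod.fst) ↔ pvFStr m ∈ PySem.Set.ofList (nodes.map Prod.fst) :=
    (PySem.Set.mem_ofList _ _).symm
  simp only [PySem.Set.contains]
  rw [Bool.eq_iff_iff]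
  simp only [List.contains_iff_mem]
  exact hiff.trans h2

theorem pv_loops_eq (nodes : List (String × String)) : ∀ (fuel idx : Nat),
    pvLoopA (PySem.Set.ofList (nodes.map Prod.fst)) idx fuel
      = pvLoopB (nodes.foldl (fun acc kv => match pvTempIndex? kv.1 with
          | some i => PySem.Set.add acc i
          | none => acc) []) idx fuel := by
  intro fuel
  induction fuel with
  | zero => intro idx; rfl
  | succ fuel ih =>
    intro idx
    rw [pvLoopA, pvLoopB]
    rw [← pv_cond_eq nodes idx]
    by_cases h : PySem.Set.contains (nodes.foldl (fun acc kv => match pvTempIndex? kv.1 with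
          | some i => PySem.Set.add acc i
          | none => acc) []) idx
    · simp only [h, if_true]
      exact ih (idx + 1)
    · simp only [h]
      rfl

-- ===== VERDICT (by name: the statement is the Claim_ definition above) =====
theorem generate_unique_node_id_spec : Claim_equal_generate_unique_node_id := by
  intro nodes _
  unfold Spec_generate_unique_node_id generate_unique_node_id generate_unique_node_id_alt
  exact pv_loops_eq nodes (nodes.length + 1) 0
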